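-- pv_equiv track=rewrite | github.com/pythonql/pythonql | pythonql/Executor.py | str_dec
-- ===== SOURCE A (Python) =====
-- def str_dec(string):
--     res = ""
--     prev_slash = False
--     for ch in string:
--         if ch == chr(92):
--             if not prev_slash:
--                 prev_slash = True
--             else:
--                 res += ch
--                 prev_slash = False
--         else:
--             prev_slash = False
--             res += ch
--     return res
-- ===== SOURCE B (Python) =====
-- def str_dec(string):
--     # index-based escape-prefix loop: backslash consumes the next character
--     out = []
--     i = 0
--     n = len(string)
--     while i < n:
--         if string[i] == chr(92):
--             i += 1
--             if i < n:
--                 out.append(string[i])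
--                 i += 1
--         else:
--             out.append(string[i])
--             i += 1
--     return "".join(out)
-- ===== Notes on version B (the rewrite author's own statement) =====
-- stated objective: alternative
-- what changed: Replaced the per-character prev_slash flag state machine with an index-based look-ahead while loop in which a backslash consumes and emits the next character (skip-by-two traversal).
import Mathlib
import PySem

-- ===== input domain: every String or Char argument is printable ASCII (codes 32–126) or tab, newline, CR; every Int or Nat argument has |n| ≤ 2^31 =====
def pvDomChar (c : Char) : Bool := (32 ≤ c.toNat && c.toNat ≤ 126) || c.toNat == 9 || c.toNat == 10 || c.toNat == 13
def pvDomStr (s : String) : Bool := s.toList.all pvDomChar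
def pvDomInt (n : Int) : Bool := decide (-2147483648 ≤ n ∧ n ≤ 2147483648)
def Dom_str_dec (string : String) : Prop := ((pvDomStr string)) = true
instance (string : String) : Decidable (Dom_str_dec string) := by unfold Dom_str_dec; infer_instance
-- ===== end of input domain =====

-- B replaces A's prev_slash flag state machine by an escape-prefix traversal where a backslash consumes the next character (alternative decomposition, same cost).


-- ===== PORT A =====
-- fold over the characters with state (accumulated result res, prev_slash flag)
def strDecStep (st : List Char × Bool) (ch : Char) : List Char × Bool :=
  if ch = Char.ofNat 92 then
    if !st.2 then (st.1, true) else (st.1 ++ [ch], false)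
  else (st.1 ++ [ch], false)

def str_dec (string : String) : String :=
  let r := string.toList.foldl strDecStep ([], false)
  String.mk r.1

-- ===== PORT B =====
-- B: escape-prefix recursion, backslash consumes the next character
def strDecAux : List Char → List Char
  | [] => []
  | c :: rest =>
    if c = Char.ofNat 92 then
      match rest with
      | [] => []
      | d :: rest' => d :: strDecAux rest'
    else c :: strDecAux rest

def str_dec_alt (string : String) : String := String.mk (strDecAux string.toList)

-- ===== PRECONDITION & SPEC =====
def Spec_str_dec (string : String) (out : String) : Prop := out = str_dec_alt string
instance (string : String) (out : String) : Decidable (Spec_str_dec string out) := by unfold Spec_str_dec; infer_instance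

-- ===== CLAIM (what is proved, stated in full; the proofs are below) =====
def Claim_equal_str_dec : Prop := ∀ (string : String), Dom_str_dec string → Spec_str_dec string (str_dec string)

-- ===== LEMMAS AND PROOFS =====

-- A's fold from a fresh (no pending backslash) state appends exactly B's decoding
theorem str_dec_aux (l : List Char) : ∀ res : List Char,
    (l.foldl strDecStep (res, false)).1 = res ++ strDecAux l := by
  induction l using strDecAux.induct with
  | case1 => intro res; simp [strDecAux]
  | case2 => intro res; simp [strDecAux, strDecStep]
  | case3 d rest' ih =>
    intro res
    simp [strDecStep, strDecAux, ih]
  | case4 c rest' hc ih =>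
    intro res
    rw [List.foldl_cons, strDecAux.eq_def]
    simp [strDecStep, hc, ih]

theorem str_dec_spec : Claim_equal_str_dec := by
  intro string _
  show String.mk _ = String.mk (strDecAux string.toList)
  rw [str_dec_aux string.toList []]
  rfl
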